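-- pv_equiv track=rewrite | github.com/YoungPin1/TuneEventsBot | TelegramBot/app/auxiliary_functions.py | checkCityInSet
-- ===== SOURCE A (Python) =====
-- def checkCityInSet(cityName, citySet):
--     # Преобразуем город в lowercase
--     cityName = cityName.lower()
--
--     # Проверяем полное совпадение
--     if cityName in citySet:
--         return True
--
--     # Разбиваем по пробелу и проверяем каждую часть
--     for part in cityName.split(" "):
--         if part in citySet:
--             return True
--
--     # Разбиваем по дефису и проверяем каждую часть
--     for part in cityName.split("-"):
--         if part in citySet:
--             return True
--
--     return False
-- ===== SOURCE B (Python) =====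
-- def checkCityInSet(cityName, citySet):
--     low = cityName.lower()
--     tokens = {low}
--     tokens.update(low.split(" "))
--     tokens.update(low.split("-"))
--     return any(c in tokens for c in citySet)
-- ===== Notes on version B (the rewrite author's own statement) =====
-- stated objective: alternative
-- what changed: Inverted the traversal: instead of A's three staged passes over candidate tokens each scanning citySet, B builds a hash set of all tokens (lowercased name plus space- and hyphen-split parts) once and makes a single pass over citySet testing each entry against that token set.
import Mathlib
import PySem

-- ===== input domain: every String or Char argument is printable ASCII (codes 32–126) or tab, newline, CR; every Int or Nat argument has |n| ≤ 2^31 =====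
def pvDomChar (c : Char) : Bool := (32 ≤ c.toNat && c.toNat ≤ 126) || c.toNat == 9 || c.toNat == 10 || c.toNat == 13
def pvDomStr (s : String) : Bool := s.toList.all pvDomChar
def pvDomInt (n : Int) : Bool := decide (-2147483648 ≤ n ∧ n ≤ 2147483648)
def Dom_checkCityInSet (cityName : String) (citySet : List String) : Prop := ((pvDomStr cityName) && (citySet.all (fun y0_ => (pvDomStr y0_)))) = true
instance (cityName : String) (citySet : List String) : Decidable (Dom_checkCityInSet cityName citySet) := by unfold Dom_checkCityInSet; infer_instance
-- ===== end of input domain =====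

-- B inverts A's traversal: it builds a set of all candidate tokens once and makes one pass over citySet testing each entry against it (objective: alternative).

-- ===== PORT A =====
-- s.split(sep) for a nonempty literal sep, via the PySem.Chars primitive (exact)
def pySplit (s sep : String) : List String :=
  (PySem.Chars.splitOn s.toList sep.toList).map (fun cs => String.ofList cs)

-- helper for A's two for-loops with early return
def pvPartLoop (parts : List String) (citySet : List String) : Bool :=
  match parts with
  | [] => false
  | p :: rest => if citySet.contains p then true else pvPartLoop rest citySet

def checkCityInSet (cityName : String) (citySet : List String) : Bool :=
  let low := PySem.Str.lower cityName
  if citySet.contains low then true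
  else if pvPartLoop (pySplit low " ") citySet then true
  else if pvPartLoop (pySplit low "-") citySet then true
  else false

-- ===== PORT B =====
def checkCityInSet_alt (cityName : String) (citySet : List String) : Bool :=
  let low := PySem.Str.lower cityName
  let tokens : PySem.Set String := PySem.Set.ofList [low]           -- {low}
  let tokens := PySem.Set.update tokens (pySplit low " ")           -- tokens.update(low.split(" "))
  let tokens := PySem.Set.update tokens (pySplit low "-")           -- tokens.update(low.split("-"))
  citySet.any (fun c => PySem.Set.contains tokens c)

-- ===== PRECONDITION & SPEC =====
def Spec_checkCityInSet (cityName : String) (citySet : List String) (out : Bool) : Prop := out = checkCityInSet_alt cityName citySet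
instance (cityName : String) (citySet : List String) (out : Bool) : Decidable (Spec_checkCityInSet cityName citySet out) := by unfold Spec_checkCityInSet; infer_instance

-- ===== CLAIM (what is proved, stated in full; the proofs are below) =====
def Claim_equal_checkCityInSet : Prop := ∀ (cityName : String) (citySet : List String), Dom_checkCityInSet cityName citySet → Spec_checkCityInSet cityName citySet (checkCityInSet cityName citySet)

-- ===== LEMMAS AND PROOFS =====

theorem pvPartLoop_eq_any (parts citySet : List String) :
    pvPartLoop parts citySet = parts.any (fun t => citySet.contains t) := by
  induction parts with
  | nil => rfl
  | cons p rest ih => simp only [pvPartLoop, ih, List.any_cons]; split_ifs <;> simp_all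

theorem pvGatherInvert (low : String) (citySet : List String) :
    (if citySet.contains low then true
     else if pvPartLoop (pySplit low " ") citySet then true
     else if pvPartLoop (pySplit low "-") citySet then true
     else false)
    = citySet.any (fun c => PySem.Set.contains
        (PySem.Set.update (PySem.Set.update (PySem.Set.ofList [low]) (pySplit low " ")) (pySplit low "-")) c) := by
  rw [Bool.eq_iff_iff]
  simp only [pvPartLoop_eq_any, Bool.if_true_left, Bool.or_eq_true, List.any_eq_true,
    List.contains_iff_mem, PySem.Set.contains_iff, PySem.Set.mem_update, PySem.Set.mem_ofList,
    List.mem_singleton, decide_eq_true_eq, Bool.false_eq_true, or_false]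
  aesop

-- ===== VERDICT (by name: the statement is the Claim_ definition above) =====
theorem checkCityInSet_spec : Claim_equal_checkCityInSet := by
  intro cityName citySet _
  unfold Spec_checkCityInSet checkCityInSet checkCityInSet_alt
  exact pvGatherInvert (PySem.Str.lower cityName) citySet
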